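-- pv_equiv track=rewrite | github.com/gkdekker/Albion_Trader_and_Crafter | main.py | chunk_item
-- ===== SOURCE A (Python) =====
-- def chunk_item(lista,size):
--     chunk_item = []
--     while len(lista) > 0:
--         chunkname = ''
--         chunk = lista[0:size-1]
--         for itens in chunk:
--             chunkname = chunkname + itens + ','
--         chunk_item.append(chunkname)
--         lista = lista[size:]
--     return chunk_item
-- ===== SOURCE B (Python) =====
-- def chunk_item(lista, size):
--     res = []
--     for i, item in enumerate(lista):
--         if i % size == 0:
--             res.append('')
--         if i % size < size - 1:
--             res[-1] = res[-1] + item + ','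
--     return res
-- ===== Notes on version B (the rewrite author's own statement) =====
-- stated objective: alternative
-- what changed: Replaced the repeated list-slicing while-loop (slice a chunk, inner join loop, reslice the tail) by a single streaming enumerate pass keeping an index-mod-size position and extending the last result string in place; Pre_ excludes nonempty lista with size <= 0, where A loops forever.
import Mathlib
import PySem

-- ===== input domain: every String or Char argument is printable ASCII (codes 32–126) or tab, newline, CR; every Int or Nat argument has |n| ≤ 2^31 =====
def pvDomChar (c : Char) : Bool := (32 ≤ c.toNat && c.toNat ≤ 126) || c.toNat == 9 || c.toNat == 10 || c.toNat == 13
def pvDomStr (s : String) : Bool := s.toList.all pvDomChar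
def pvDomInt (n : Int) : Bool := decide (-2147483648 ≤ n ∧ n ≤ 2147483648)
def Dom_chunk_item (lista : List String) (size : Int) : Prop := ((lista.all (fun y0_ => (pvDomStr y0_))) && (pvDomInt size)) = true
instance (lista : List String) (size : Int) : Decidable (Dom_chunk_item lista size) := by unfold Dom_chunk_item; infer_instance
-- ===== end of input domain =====

-- B is a single streaming pass with an index-mod-size position instead of A's repeated tail re-slicing; return values agree on Pre_ (A loops forever on nonempty lista with size ≤ 0).
-- Python '+' on str is ported via List Char concatenation (exact on the ASCII domain), wrapped back with String.ofList.

-- ===== PORT A =====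
-- while-loop as fuel recursion; fuel = lista.length + 1 never runs out under Pre_ (each iteration drops ≥ 1 element)
def chunkAgo (size : Int) : Nat → List String → List String → List String
  | 0, _, acc => acc
  | fuel + 1, lista, acc =>
    if lista.length > 0 then
      let chunk := PySem.List.slice lista (some 0) (some (size - 1))
      let chunkname := chunk.foldl (fun cs itens => cs ++ itens.toList ++ [',']) []
      chunkAgo size fuel (PySem.List.slice lista (some size) none) (acc ++ [String.ofList chunkname])
    else acc

def chunk_item (lista : List String) (size : Int) : List String :=
  chunkAgo size (lista.length + 1) lista []

-- ===== PORT B =====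
-- res[-1] = res[-1] + item + ','  : modify the last element of the list
def modLast (f : List Char → List Char) : List (List Char) → List (List Char)
  | [] => []                     -- unreachable under Pre_ (Python res[-1] would raise IndexError)
  | [x] => [f x]
  | x :: xs => x :: modLast f xs

def altGo (size : Int) : List String → Int → List (List Char) → List (List Char)
  | [], _, acc => acc
  | item :: rest, i, acc =>
    let acc1 := if PySem.Int.mod i size = 0 then acc ++ [[]] else acc
    let acc2 := if PySem.Int.mod i size < size - 1 then modLast (· ++ item.toList ++ [',']) acc1 else acc1
    altGo size rest (i + 1) acc2

def chunk_item_alt (lista : List String) (size : Int) : List String :=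
  (altGo size lista 0 []).map String.ofList

-- ===== PRECONDITION & SPEC =====
-- Pre_ excludes exactly the inputs on which A never returns: nonempty lista with size ≤ 0 makes A's while-loop run forever.
def Pre_chunk_item (lista : List String) (size : Int) : Prop := lista = [] ∨ 1 ≤ size
instance (lista : List String) (size : Int) : Decidable (Pre_chunk_item lista size) := by unfold Pre_chunk_item; infer_instance

def pvWitness_chunk_item : List String × Int := (["a", "bb", "c", "d", "e"], 2)

def Spec_chunk_item (lista : List String) (size : Int) (out : List String) : Prop := out = chunk_item_alt lista size
instance (lista : List String) (size : Int) (out : List String) : Decidable (Spec_chunk_item lista size out) := by unfold Spec_chunk_item; infer_instance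

-- ===== CLAIM (what is proved, stated in full; the proofs are below) =====
def Claim_equal_chunk_item : Prop := ∀ (lista : List String) (size : Int), Dom_chunk_item lista size → Pre_chunk_item lista size → Spec_chunk_item lista size (chunk_item lista size)

-- ===== LEMMAS AND PROOFS =====

-- common description of the result (chunk size s+1, s items joined per chunk), as List Char
def joinC (l : List String) : List Char := l.flatMap (fun x => x.toList ++ [','])

def specN (s : Nat) : List String → List (List Char)
  | [] => []
  | h :: t => joinC ((h :: t).take s) :: specN s (t.drop s)
termination_by l => l.length
decreasing_by simp

lemma chunkAgo_eq (s : Nat) : ∀ (fuel : Nat) (lista : List String) (acc : List String),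
    lista.length ≤ fuel →
    chunkAgo ((s : Int) + 1) fuel lista acc = acc ++ (specN s lista).map String.ofList := by
  intro fuel
  induction fuel with
  | zero =>
    intro lista acc h
    have hl : lista = [] := List.eq_nil_of_length_eq_zero (by omega)
    subst hl
    simp [chunkAgo, specN]
  | succ fuel ih =>
    intro lista acc h
    cases lista with
    | nil => simp [chunkAgo, specN]
    | cons x t =>
      have e1 : PySem.List.slice (x :: t) (some 0) (some ((s : Int) + 1 - 1)) = (x :: t).take s := by
        rw [PySem.List.slice_zero_start]
        have hc : ((s : Int) + 1 - 1) = ((s : Nat) : Int) := by ring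
        rw [hc, PySem.List.slice_to_natCast]
      have e2 : PySem.List.slice (x :: t) (some ((s : Int) + 1)) none = t.drop s := by
        have hc : ((s : Int) + 1) = (((s + 1 : Nat)) : Int) := by push_cast; ring
        rw [hc, PySem.List.slice_from_natCast, List.drop_succ_cons]
      simp only [chunkAgo, List.length_cons, e1, e2]
      rw [ih (t.drop s) _ (by simp only [List.length_drop]; simp only [List.length_cons] at h; omega)]
      simp [specN, joinC, List.flatMap_def, List.map_take]

lemma modLast_append (f : List Char → List Char) (acc : List (List Char)) (cur : List Char) :
    modLast f (acc ++ [cur]) = acc ++ [f cur] := by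
  induction acc with
  | nil => rfl
  | cons x xs ih =>
    cases xs with
    | nil => rfl
    | cons y ys => simpa [modLast] using ih

lemma mod_offset (s : Nat) (q : Int) (j : Nat) (hj : j ≤ s) :
    PySem.Int.mod (((s : Int) + 1) * q + (j : Int)) ((s : Int) + 1) = (j : Int) := by
  rw [PySem.Int.mod_eq_emod_of_pos (by omega)]
  rw [add_comm, Int.add_mul_emod_self_left]
  exact Int.emod_eq_of_lt (by omega) (by omega)

lemma altGo_inner (s : Nat) : ∀ (rest : List String),
    (∀ rest2 : List String, rest2.length ≤ rest.length → ∀ (q : Int) (acc : List (List Char)),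
        altGo ((s : Int) + 1) rest2 (((s : Int) + 1) * q) acc = acc ++ specN s rest2) →
    ∀ (j : Nat), 1 ≤ j → j ≤ s → ∀ (q : Int) (cur : List Char) (acc : List (List Char)),
    altGo ((s : Int) + 1) rest (((s : Int) + 1) * q + (j : Int)) (acc ++ [cur]) =
      acc ++ (cur ++ joinC (rest.take (s - j))) :: specN s (rest.drop (s + 1 - j)) := by
  intro rest
  induction rest with
  | nil =>
    intro _ j _ _ q cur acc
    simp [altGo, specN, joinC]
  | cons x rest' ih =>
    intro bnd j hj1 hj2 q cur acc
    have bnd' : ∀ rest2 : List String, rest2.length ≤ rest'.length → ∀ (q : Int) (acc : List (List Char)),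
        altGo ((s : Int) + 1) rest2 (((s : Int) + 1) * q) acc = acc ++ specN s rest2 := by
      intro rest2 h2 q2 acc2
      exact bnd rest2 (by simp only [List.length_cons]; omega) q2 acc2
    have hm := mod_offset s q j hj2
    by_cases hcase : j < s
    · simp only [altGo, hm, if_neg (by exact_mod_cast by omega : ¬ ((j : Nat) : Int) = 0),
        if_pos (by omega : ((j : Nat) : Int) < (s : Int) + 1 - 1),
        modLast_append]
      have hi : ((s : Int) + 1) * q + (j : Int) + 1 = ((s : Int) + 1) * q + ((j + 1 : Nat) : Int) := by
        push_cast
        ring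
      rw [hi, ih bnd' (j + 1) (by omega) (by omega) q (cur ++ x.toList ++ [',']) acc]
      have ht : s - j = (s - (j + 1)) + 1 := by omega
      have hd : s + 1 - j = (s + 1 - (j + 1)) + 1 := by omega
      rw [ht, hd, List.take_succ_cons, List.drop_succ_cons]
      simp [joinC]
    · have hjs : j = s := by omega
      subst hjs
      simp only [altGo, hm, if_neg (by exact_mod_cast by omega : ¬ ((j : Nat) : Int) = 0),
        if_neg (by omega : ¬ (((j : Nat) : Int) < ((j : Nat) : Int) + 1 - 1))]
      have hi : ((j : Int) + 1) * q + (j : Int) + 1 = ((j : Int) + 1) * (q + 1) := by ring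
      rw [hi, bnd rest' (by simp) (q + 1) (acc ++ [cur])]
      have h1 : j - j = 0 := by omega
      have h2 : j + 1 - j = 1 := by omega
      rw [h1, h2]
      simp [joinC]

lemma altGo_boundary (s : Nat) : ∀ (n : Nat) (rest : List String), rest.length ≤ n →
    ∀ (q : Int) (acc : List (List Char)),
    altGo ((s : Int) + 1) rest (((s : Int) + 1) * q) acc = acc ++ specN s rest := by
  intro n
  induction n with
  | zero =>
    intro rest h q acc
    have hl : rest = [] := List.eq_nil_of_length_eq_zero (by omega)
    subst hl
    simp [altGo, specN]
  | succ n ih =>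
    intro rest h q acc
    cases rest with
    | nil => simp [altGo, specN]
    | cons x rest' =>
      have hlen : rest'.length ≤ n := by simp only [List.length_cons] at h; omega
      have hm : PySem.Int.mod (((s : Int) + 1) * q) ((s : Int) + 1) = 0 := by
        have h0 := mod_offset s q 0 (by omega)
        rw [Int.natCast_zero, add_zero] at h0
        exact h0
      cases s with
      | zero =>
        simp only [altGo, hm, if_true, if_neg (show ¬ ((0 : Int) < ((0 : Nat) : Int) + 1 - 1) by norm_num)]
        have hi : ((0 : Nat) : Int) + 1 = 1 := by norm_num
        have hi2 : (((0 : Nat) : Int) + 1) * q + 1 = (((0 : Nat) : Int) + 1) * (q + 1) := by ring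
        rw [hi2, ih rest' hlen (q + 1) (acc ++ [[]])]
        simp [specN, joinC]
      | succ k =>
        have bnd' : ∀ rest2 : List String, rest2.length ≤ rest'.length → ∀ (q : Int) (acc : List (List Char)),
            altGo (((k + 1 : Nat) : Int) + 1) rest2 ((((k + 1 : Nat) : Int) + 1) * q) acc = acc ++ specN (k + 1) rest2 := by
          intro rest2 h2 q2 acc2
          exact ih rest2 (le_trans h2 hlen) q2 acc2
        simp only [altGo, hm, if_true,
          if_pos (by push_cast; omega : (0 : Int) < ((k + 1 : Nat) : Int) + 1 - 1),
          modLast_append]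
        have hi : (((k + 1 : Nat) : Int) + 1) * q + 1 = (((k + 1 : Nat) : Int) + 1) * q + ((1 : Nat) : Int) := by
          push_cast; ring
        rw [hi, altGo_inner (k + 1) rest' bnd' 1 (by omega) (by omega) q ([] ++ x.toList ++ [',']) acc]
        simp [specN, joinC]

-- ===== VERDICT (by name: the statement is the Claim_ definition above) =====
theorem chunk_item_spec : Claim_equal_chunk_item := by
  unfold Claim_equal_chunk_item
  intro lista size _ hpre
  unfold Spec_chunk_item
  rcases hpre with hnil | hpos
  · subst hnil
    simp [chunk_item, chunk_item_alt, chunkAgo, altGo]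
  · have hs : size = (((size - 1).toNat : Nat) : Int) + 1 := by omega
    unfold chunk_item chunk_item_alt
    rw [hs, chunkAgo_eq ((size - 1).toNat) (lista.length + 1) lista [] (by omega)]
    have h0 : (0 : Int) = ((((size - 1).toNat : Nat) : Int) + 1) * 0 := by ring
    rw [h0, altGo_boundary ((size - 1).toNat) lista.length lista le_rfl 0 []]
    simp
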